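-- pv_equiv track=rewrite | github.com/aviAVIRAL/MY_WORK | DSA/4 array/Sub Arr/8_____.py | f
-- ===== SOURCE A (Python) =====
-- def f(arr , k ):
--     n = len(arr)
--
--     length = 0
--     cnt = 0
--     for i in range(n):
--         for j in range(i, n):
--             s = 0
--             for K in range(i, j + 1):
--                 s += arr[K]
--
--             if s == k:
--                 cnt += 1
--                 length = max ( length ,  j+1  -i )
--
--     return length, cnt
-- ===== SOURCE B (Python) =====
-- def f(arr, k):
--     # prefix-sum hashmaps: count occurrences and first index of each prefix sum
--     count = {0: 1}
--     first = {0: 0}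
--     length = 0
--     cnt = 0
--     p = 0
--     idx = 0
--     for x in arr:
--         idx += 1
--         p += x
--         t = p - k
--         if t in count:
--             cnt += count[t]
--             length = max(length, idx - first[t])
--         count[p] = count.get(p, 0) + 1
--         if p not in first:
--             first[p] = idx
--     return length, cnt
-- ===== Notes on version B (the rewrite author's own statement) =====
-- stated objective: faster
-- what changed: B makes one pass keeping a running prefix sum and two hashmaps (occurrence count and first index of each prefix sum), so the count of subarrays summing to k and the longest one are read off the maps instead of enumerating and re-summing every subarray.
import Mathlib
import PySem

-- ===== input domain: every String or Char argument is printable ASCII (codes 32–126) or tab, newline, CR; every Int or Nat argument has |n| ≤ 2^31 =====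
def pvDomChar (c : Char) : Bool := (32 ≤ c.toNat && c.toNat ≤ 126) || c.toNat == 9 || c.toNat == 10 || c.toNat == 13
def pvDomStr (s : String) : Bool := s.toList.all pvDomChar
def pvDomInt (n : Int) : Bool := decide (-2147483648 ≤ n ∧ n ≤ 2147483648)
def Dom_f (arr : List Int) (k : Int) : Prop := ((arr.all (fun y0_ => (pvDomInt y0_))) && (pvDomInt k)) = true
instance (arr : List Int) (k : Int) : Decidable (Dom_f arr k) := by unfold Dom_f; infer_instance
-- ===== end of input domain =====

-- B replaces A's exhaustive enumeration of all subarrays (re-summing each one) by a single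
-- pass over the array with a running prefix sum and two hashmaps: the number of occurrences
-- and the first index of each prefix sum seen so far. O(n) instead of O(n^3).

-- ===== PORT A =====
def f (arr : List Int) (k : Int) : Int × Int :=
  let n : Int := (arr.length : Int)
  (PySem.List.pyRange 0 n 1).foldl (fun (st : Int × Int) i =>
    (PySem.List.pyRange i n 1).foldl (fun (st2 : Int × Int) j =>
      let s : Int := (PySem.List.pyRange i (j + 1) 1).foldl
        (fun s K => s + PySem.List.pyGetD arr K 0) 0
      if s = k then (max st2.1 (j + 1 - i), st2.2 + 1) else st2) st) (0, 0)

-- ===== PORT B =====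
def f_alt (arr : List Int) (k : Int) : Int × Int :=
  let st := arr.foldl
    (fun (st : PySem.Dict Int Int × PySem.Dict Int Int × Int × Int × Int × Int) x =>
      let count := st.1
      let first := st.2.1
      let length := st.2.2.1
      let cnt := st.2.2.2.1
      let idx := st.2.2.2.2.2 + 1
      let p := st.2.2.2.2.1 + x
      let t := p - k
      let lc : Int × Int :=
        if count.contains t then
          (max length (idx - first.getD t 0), cnt + count.getD t 0)
        else (length, cnt)
      let count := count.insert p (count.getD p 0 + 1)
      let first := if first.contains p then first else first.insert p idx
      (count, first, lc.1, lc.2, p, idx))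
    (PySem.Dict.ofList [(0, 1)], PySem.Dict.ofList [(0, 0)], 0, 0, 0, 0)
  (st.2.2.1, st.2.2.2.1)

-- ===== PRECONDITION & SPEC =====
def Spec_f (arr : List Int) (k : Int) (out : Int × Int) : Prop := out = f_alt arr k
instance (arr : List Int) (k : Int) (out : Int × Int) : Decidable (Spec_f arr k out) := by unfold Spec_f; infer_instance

-- ===== CLAIM (what is proved, stated in full; the proofs are below) =====
def Claim_equal_f : Prop := ∀ (arr : List Int) (k : Int), Dom_f arr k → Spec_f arr k (f arr k)

-- ===== LEMMAS AND PROOFS =====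

/-- Prefix sum `arr[0] + … + arr[t-1]` as the fold A's innermost loop computes. -/
def Pf (arr : List Int) (t : Int) : Int :=
  (PySem.List.pyRange 0 t 1).foldl (fun s K => s + PySem.List.pyGetD arr K 0) 0

/-- Sum of `arr[i:b]` as a fold starting at `i`. -/
def sumTo (arr : List Int) (i b : Int) : Int :=
  (PySem.List.pyRange i b 1).foldl (fun s K => s + PySem.List.pyGetD arr K 0) 0

/-- The common per-subarray update: the pair `(i, j)` stands for subarray `arr[i : j+1]`. -/
def step (arr : List Int) (k : Int) (st : Int × Int) (p : Int × Int) : Int × Int :=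
  if Pf arr (p.2 + 1) - Pf arr p.1 = k then (max st.1 (p.2 + 1 - p.1), st.2 + 1) else st

/-- All subarray index pairs in A's order: start-major. -/
def LA (arr : List Int) : List (Int × Int) :=
  (PySem.List.pyRange 0 (arr.length : Int) 1).flatMap (fun i =>
    (PySem.List.pyRange i (arr.length : Int) 1).map (fun j => (i, j)))

/-- All subarray index pairs in B's order: end-major. -/
def LB (arr : List Int) : List (Int × Int) :=
  (PySem.List.pyRange 0 (arr.length : Int) 1).flatMap (fun j =>
    (PySem.List.pyRange 0 (j + 1) 1).map (fun i => (i, j)))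

theorem sumTo_succ (arr : List Int) (i b : Int) (h : i ≤ b) :
    sumTo arr i (b + 1) = sumTo arr i b + PySem.List.pyGetD arr b 0 := by
  unfold sumTo
  rw [PySem.List.pyRange_one_succ_right h, List.foldl_append]
  rfl

theorem sumTo_self (arr : List Int) (i : Int) : sumTo arr i i = 0 := by
  unfold sumTo
  rw [PySem.List.pyRange_one_eq_nil le_rfl]
  rfl

theorem sumTo_eq_sub (arr : List Int) (i b : Int) (h0 : 0 ≤ i) (h : i ≤ b) :
    sumTo arr i b = Pf arr b - Pf arr i := by
  have key : ∀ (m : Nat) (b : Int), (b - i).toNat = m → i ≤ b →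
      sumTo arr i b = Pf arr b - Pf arr i := by
    intro m
    induction m with
    | zero =>
      intro b hm hib
      have : b = i := by omega
      subst this
      rw [sumTo_self]
      omega
    | succ m ih =>
      intro b hm hib
      have hc : i ≤ b - 1 := by omega
      have hb : b = (b - 1) + 1 := by omega
      rw [hb, sumTo_succ arr i (b - 1) hc]
      have hPf : Pf arr ((b - 1) + 1) = Pf arr (b - 1) + PySem.List.pyGetD arr (b - 1) 0 :=
        sumTo_succ arr 0 (b - 1) (by omega)
      rw [hPf, ih (b - 1) (by omega) hc]
      ring
  exact key ((b - i).toNat) b rfl h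

theorem A_eq (arr : List Int) (k : Int) :
    f arr k = (LA arr).foldl (step arr k) (0, 0) := by
  unfold f LA
  rw [List.foldl_flatMap]
  refine PySem.List.foldl_congr_mem _ _ _ _ (fun st i hi => ?_)
  rw [List.foldl_map]
  refine PySem.List.foldl_congr_mem _ _ _ _ (fun st2 j hj => ?_)
  obtain ⟨hi0, -⟩ := (PySem.List.mem_pyRange_one).mp hi
  obtain ⟨hji, -⟩ := (PySem.List.mem_pyRange_one).mp hj
  show (if sumTo arr i (j + 1) = k then _ else _) = step arr k st2 (i, j)
  unfold step
  rw [sumTo_eq_sub arr i (j + 1) hi0 (by omega)]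

theorem step_rcomm (arr : List Int) (k : Int) (z : Int × Int) (p q : Int × Int) :
    step arr k (step arr k z p) q = step arr k (step arr k z q) p := by
  unfold step
  split_ifs <;> simp [max_right_comm]

theorem mem_LA (arr : List Int) (p : Int × Int) :
    p ∈ LA arr ↔ 0 ≤ p.1 ∧ p.1 ≤ p.2 ∧ p.2 < (arr.length : Int) := by
  unfold LA
  simp only [List.mem_flatMap, List.mem_map, PySem.List.mem_pyRange_one]
  constructor
  · rintro ⟨i, ⟨hi0, hin⟩, j, ⟨hji, hjn⟩, rfl⟩
    exact ⟨hi0, hji, hjn⟩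
  · rintro ⟨h1, h2, h3⟩
    exact ⟨p.1, ⟨h1, by omega⟩, p.2, ⟨h2, h3⟩, rfl⟩

theorem mem_LB (arr : List Int) (p : Int × Int) :
    p ∈ LB arr ↔ 0 ≤ p.1 ∧ p.1 ≤ p.2 ∧ p.2 < (arr.length : Int) := by
  unfold LB
  simp only [List.mem_flatMap, List.mem_map, PySem.List.mem_pyRange_one]
  constructor
  · rintro ⟨j, ⟨hj0, hjn⟩, i, ⟨hi0, hij⟩, rfl⟩
    exact ⟨hi0, by omega, hjn⟩
  · rintro ⟨h1, h2, h3⟩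
    exact ⟨p.2, ⟨by omega, h3⟩, p.1, ⟨h1, by omega⟩, rfl⟩

theorem nodup_LA (arr : List Int) : (LA arr).Nodup := by
  unfold LA
  rw [List.nodup_flatMap]
  refine ⟨fun i _ => ?_, ?_⟩
  · exact (PySem.List.nodup_pyRange_one _ _).map (fun a b h => congrArg Prod.snd h)
  · refine (PySem.List.nodup_pyRange_one _ _).pairwise_of_forall_ne (fun a _ b _ hab => ?_)
    simp only [List.disjoint_left, List.mem_map]
    rintro x ⟨j, _, rfl⟩ ⟨j', _, hx⟩
    exact hab (congrArg Prod.fst hx).symm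

theorem nodup_LB (arr : List Int) : (LB arr).Nodup := by
  unfold LB
  rw [List.nodup_flatMap]
  refine ⟨fun j _ => ?_, ?_⟩
  · exact (PySem.List.nodup_pyRange_one _ _).map (fun a b h => congrArg Prod.fst h)
  · refine (PySem.List.nodup_pyRange_one _ _).pairwise_of_forall_ne (fun a _ b _ hab => ?_)
    simp only [List.disjoint_left, List.mem_map]
    rintro x ⟨i, _, rfl⟩ ⟨i', _, hx⟩
    exact hab (congrArg Prod.snd hx).symm

theorem LA_perm_LB (arr : List Int) : List.Perm (LA arr) (LB arr) := by
  refine (List.perm_ext_iff_of_nodup (nodup_LA arr) (nodup_LB arr)).mpr (fun p => ?_)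
  rw [mem_LA, mem_LB]

/-- Starts `i ≤ j` whose prefix sum `Pf i` equals `v`, in increasing order. -/
def starts (arr : List Int) (j v : Int) : List Int :=
  (PySem.List.pyRange 0 (j + 1) 1).filter (fun i => decide (Pf arr i = v))

/-- Folding the per-pair update over an increasing list of candidate starts is read off the
filtered list: its head (the FIRST matching start) gives the max width, its length the count. -/
theorem inner_fold (arr : List Int) (c t : Int) :
    ∀ (L : List Int) (st : Int × Int), L.Pairwise (· < ·) →
    L.foldl (fun st i => if Pf arr i = t then (max st.1 (c - i), st.2 + 1) else st) st
      = match L.filter (fun i => decide (Pf arr i = t)) with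
        | [] => st
        | i0 :: L0 => (max st.1 (c - i0), st.2 + ((L0.length : Int) + 1)) := by
  intro L
  induction L with
  | nil => intro st _; rfl
  | cons a L' ih =>
    intro st hL
    obtain ⟨ha, hL'⟩ := List.pairwise_cons.mp hL
    by_cases hP : Pf arr a = t
    · simp only [List.foldl_cons, List.filter_cons, hP, decide_true, if_true]
      rw [ih _ hL']
      rcases hfl : L'.filter (fun i => decide (Pf arr i = t)) with - | ⟨i0, rest⟩
      · simp
      · have hi0 : i0 ∈ L' := List.mem_of_mem_filter (hfl ▸ List.mem_cons_self)
        have : max (max st.1 (c - a)) (c - i0) = max st.1 (c - a) := by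
          have := ha i0 hi0; omega
        simp only [this, List.length_cons, Prod.mk.injEq]
        exact ⟨trivial, by push_cast; ring⟩
    · simp only [List.foldl_cons, List.filter_cons, hP, decide_false, if_false]
      exact ih st hL'

/-- The pairs with end `≥ j`, end-major (what remains of `LB` after `j` steps). -/
def LBfrom (arr : List Int) (j : Int) : List (Int × Int) :=
  (PySem.List.pyRange j (arr.length : Int) 1).flatMap (fun j' =>
    (PySem.List.pyRange 0 (j' + 1) 1).map (fun i => (i, j')))

/-- The loop body of `f_alt`, named for the invariant proof. -/
def Gb (k : Int) (st : PySem.Dict Int Int × PySem.Dict Int Int × Int × Int × Int × Int)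
    (x : Int) : PySem.Dict Int Int × PySem.Dict Int Int × Int × Int × Int × Int :=
  let count := st.1
  let first := st.2.1
  let length := st.2.2.1
  let cnt := st.2.2.2.1
  let idx := st.2.2.2.2.2 + 1
  let p := st.2.2.2.2.1 + x
  let t := p - k
  let lc : Int × Int :=
    if count.contains t then
      (max length (idx - first.getD t 0), cnt + count.getD t 0)
    else (length, cnt)
  let count := count.insert p (count.getD p 0 + 1)
  let first := if first.contains p then first else first.insert p idx
  (count, first, lc.1, lc.2, p, idx)

theorem starts_succ (arr : List Int) (j v : Int) (hj : 0 ≤ j) :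
    starts arr (j + 1) v
      = starts arr j v ++ (if Pf arr (j + 1) = v then [j + 1] else []) := by
  unfold starts
  rw [PySem.List.pyRange_one_succ_right (by omega), List.filter_append]
  simp only [List.filter_cons, List.filter_nil]
  by_cases h : Pf arr (j + 1) = v <;> simp [h]

/-- Invariant: after `j` loop iterations the dicts describe `starts arr j`, the running pair is
the fold of `step` over the already-seen pairs, and the remaining fold finishes `LB`. -/
theorem count_step (arr : List Int) (j : Int) (hj : 0 ≤ j) (count : PySem.Dict Int Int)
    (Hc : ∀ v, count.getD v 0 = ((starts arr j v).length : Int)) (v : Int) :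
    (count.insert (Pf arr (j + 1)) (count.getD (Pf arr (j + 1)) 0 + 1)).getD v 0
      = ((starts arr (j + 1) v).length : Int) := by
  rw [PySem.Dict.getD_insert, starts_succ arr j v hj]
  by_cases hv : v = Pf arr (j + 1)
  · simp [hv, Hc]
  · have hv' : Pf arr (j + 1) ≠ v := Ne.symm hv
    simp [hv, hv', Hc]

theorem countc_step (arr : List Int) (j : Int) (hj : 0 ≤ j) (count : PySem.Dict Int Int)
    (Hcc : ∀ v, count.contains v = !(starts arr j v).isEmpty) (w : Int) (v : Int) :
    (count.insert (Pf arr (j + 1)) w).contains v = !(starts arr (j + 1) v).isEmpty := by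
  rw [PySem.Dict.contains_insert, starts_succ arr j v hj]
  by_cases hv : v = Pf arr (j + 1)
  · simp [hv]
  · have hv' : Pf arr (j + 1) ≠ v := Ne.symm hv
    simp [hv, hv', Hcc]

theorem firstc_step (arr : List Int) (j : Int) (hj : 0 ≤ j) (first : PySem.Dict Int Int)
    (Hfc : ∀ v, first.contains v = !(starts arr j v).isEmpty) (v : Int) :
    (if first.contains (Pf arr (j + 1)) then first
     else first.insert (Pf arr (j + 1)) (j + 1)).contains v
      = !(starts arr (j + 1) v).isEmpty := by
  rw [starts_succ arr j v hj]
  by_cases hv : v = Pf arr (j + 1)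
  · subst hv
    by_cases hcp : first.contains (Pf arr (j + 1)) = true
    · rw [if_pos hcp]
      simp [hcp]
    · rw [if_neg hcp]
      simp [PySem.Dict.contains_insert_self]
  · have hne : (if Pf arr (j + 1) = v then [j + 1] else []) = ([] : List Int) := by
      simp [Ne.symm hv]
    rw [hne, List.append_nil]
    split_ifs with hcp
    · exact Hfc v
    · rw [PySem.Dict.contains_insert]
      simp [hv, Hfc]

theorem first_step (arr : List Int) (j : Int) (hj : 0 ≤ j) (first : PySem.Dict Int Int)
    (Hfc : ∀ v, first.contains v = !(starts arr j v).isEmpty)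
    (Hf : ∀ v i0 L0, starts arr j v = i0 :: L0 → first.getD v 0 = i0)
    (v i0 : Int) (L0 : List Int) (hst : starts arr (j + 1) v = i0 :: L0) :
    (if first.contains (Pf arr (j + 1)) then first
     else first.insert (Pf arr (j + 1)) (j + 1)).getD v 0 = i0 := by
  rw [starts_succ arr j v hj] at hst
  by_cases hv : v = Pf arr (j + 1)
  · subst hv
    rcases hs : starts arr j (Pf arr (j + 1)) with - | ⟨a, L⟩
    · have hcp : first.contains (Pf arr (j + 1)) = false := by simp [Hfc, hs]
      rw [if_neg (by simp [hcp]), PySem.Dict.getD_insert_self]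
      rw [hs] at hst
      simp at hst
      omega
    · have hcp : first.contains (Pf arr (j + 1)) = true := by simp [Hfc, hs]
      rw [if_pos hcp]
      rw [hs] at hst
      simp at hst
      exact hst.1 ▸ Hf _ a L hs
  · have hne : (if Pf arr (j + 1) = v then [j + 1] else []) = ([] : List Int) := by
      simp [Ne.symm hv]
    rw [hne, List.append_nil] at hst
    split_ifs with hcp
    · exact Hf v i0 L0 hst
    · rw [PySem.Dict.getD_insert, if_neg hv]
      exact Hf v i0 L0 hst

theorem B_inv (arr : List Int) (k : Int) :
    ∀ (rest : List Int) (j : Nat), j + rest.length = arr.length → arr.drop j = rest →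
    ∀ (count first : PySem.Dict Int Int) (len cnt : Int),
    (∀ v, count.getD v 0 = ((starts arr j v).length : Int)) →
    (∀ v, count.contains v = !(starts arr j v).isEmpty) →
    (∀ v, first.contains v = !(starts arr j v).isEmpty) →
    (∀ v i0 L0, starts arr j v = i0 :: L0 → first.getD v 0 = i0) →
    (let res := rest.foldl (Gb k) (count, first, len, cnt, Pf arr j, (j : Int))
     (res.2.2.1, res.2.2.2.1))
      = (LBfrom arr j).foldl (step arr k) (len, cnt) := by
  intro rest
  induction rest with
  | nil =>
    intro j hlen _ count first len cnt _ _ _ _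
    simp only [List.length_nil] at hlen
    have hj : (j : Int) = (arr.length : Int) := by omega
    simp only [List.foldl_nil]
    unfold LBfrom
    rw [hj, PySem.List.pyRange_one_eq_nil le_rfl]
    rfl
  | cons x rest' ih =>
    intro j hlen hdrop count first len cnt Hc Hcc Hfc Hf
    simp only [List.length_cons] at hlen
    have hjlt : j < arr.length := by omega
    have hdc := List.drop_eq_getElem_cons hjlt
    rw [hdrop] at hdc
    injection hdc with hx hdrop''
    have hdrop'' : arr.drop (j + 1) = rest' := hdrop''.symm
    have hget : PySem.List.pyGetD arr (j : Int) 0 = x := by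
      rw [hx]
      simp [PySem.List.pyGetD_natCast, List.getD_eq_getElem?_getD, hjlt]
    have hPf0 : Pf arr ((j : Int) + 1) = Pf arr (j : Int) + PySem.List.pyGetD arr (j : Int) 0 :=
      sumTo_succ arr 0 (j : Int) (by omega)
    have hPf : Pf arr ((j : Int) + 1) = Pf arr j + x := by rw [hPf0, hget]
    -- one step of the loop
    simp only [List.foldl_cons]
    have hGb : Gb k (count, first, len, cnt, Pf arr (j : Int), (j : Int)) x
        = (count.insert (Pf arr ((j : Int) + 1)) (count.getD (Pf arr ((j : Int) + 1)) 0 + 1),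
           (if first.contains (Pf arr ((j : Int) + 1)) then first
            else first.insert (Pf arr ((j : Int) + 1)) ((j : Int) + 1)),
           (if count.contains (Pf arr ((j : Int) + 1) - k) then
              (max len ((j : Int) + 1 - first.getD (Pf arr ((j : Int) + 1) - k) 0),
               cnt + count.getD (Pf arr ((j : Int) + 1) - k) 0)
            else (len, cnt)).1,
           (if count.contains (Pf arr ((j : Int) + 1) - k) then
              (max len ((j : Int) + 1 - first.getD (Pf arr ((j : Int) + 1) - k) 0),
               cnt + count.getD (Pf arr ((j : Int) + 1) - k) 0)
            else (len, cnt)).2,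
           Pf arr ((j : Int) + 1), (j : Int) + 1) := by
      simp only [Gb, hPf]
    rw [hGb]
    set t := Pf arr ((j : Int) + 1) - k with ht
    set lc : Int × Int :=
      (if count.contains t then
        (max len ((j : Int) + 1 - first.getD t 0), cnt + count.getD t 0)
       else (len, cnt)) with hlc
    have hcast : ((j + 1 : Nat) : Int) = (j : Int) + 1 := by push_cast; ring
    have hih := ih (j + 1) (by omega) hdrop''
      (count.insert (Pf arr ((j : Int) + 1)) (count.getD (Pf arr ((j : Int) + 1)) 0 + 1))
      (if first.contains (Pf arr ((j : Int) + 1)) then first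
       else first.insert (Pf arr ((j : Int) + 1)) ((j : Int) + 1))
      lc.1 lc.2
      (by rw [hcast]; exact count_step arr (j : Int) (by omega) count Hc)
      (by rw [hcast]; exact countc_step arr (j : Int) (by omega) count Hcc _)
      (by rw [hcast]; exact firstc_step arr (j : Int) (by omega) first Hfc)
      (by rw [hcast]; exact first_step arr (j : Int) (by omega) first Hfc Hf)
    rw [hcast] at hih
    simp only at hih ⊢
    rw [hih]
    -- now relate the two sides of LBfrom
    have hLB : LBfrom arr (j : Int)
        = ((PySem.List.pyRange 0 ((j : Int) + 1) 1).map (fun i => (i, (j : Int))))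
          ++ LBfrom arr ((j : Int) + 1) := by
      unfold LBfrom
      rw [PySem.List.pyRange_one_cons (by exact_mod_cast hjlt), List.flatMap_cons]
    rw [hLB, List.foldl_append]
    congr 1
    -- the j-th block of LB computes exactly lc
    rw [List.foldl_map]
    have hcongr : (PySem.List.pyRange 0 ((j : Int) + 1) 1).foldl
        (fun st i => step arr k st (i, (j : Int))) (len, cnt)
        = (PySem.List.pyRange 0 ((j : Int) + 1) 1).foldl
        (fun st i => if Pf arr i = t then (max st.1 ((j : Int) + 1 - i), st.2 + 1) else st)
        (len, cnt) := by
      refine PySem.List.foldl_congr_mem _ _ _ _ (fun st i _ => ?_)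
      unfold step
      simp only
      split_ifs with h1 h2 h2 <;> first | rfl | omega
    rw [hcongr, inner_fold arr ((j : Int) + 1) t _ (len, cnt)
      (PySem.List.pairwise_lt_pyRange_one 0 ((j : Int) + 1))]
    show (lc.1, lc.2) = (match starts arr (j : Int) t with
      | [] => (len, cnt)
      | i0 :: L0 => (max len ((j : Int) + 1 - i0), cnt + ((L0.length : Int) + 1)))
    rcases hs : starts arr (j : Int) t with - | ⟨i0, L0⟩
    · have hcf : count.contains t = false := by simp [Hcc, hs]
      rw [hlc, if_neg (by simp [hcf])]
    · have hct : count.contains t = true := by simp [Hcc, hs]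
      have hcd : count.getD t 0 = ((L0.length : Int) + 1) := by
        rw [Hc, hs, List.length_cons]; push_cast; ring
      have hfd : first.getD t 0 = i0 := Hf t i0 L0 hs
      rw [hlc, if_pos hct, hcd, hfd]

theorem starts_zero (arr : List Int) (v : Int) :
    starts arr 0 v = if (0 : Int) = v then [0] else [] := by
  unfold starts
  rw [show PySem.List.pyRange 0 (0 + 1) 1 = [0] from by decide]
  simp only [List.filter, show Pf arr 0 = 0 from rfl]
  by_cases hv : (0 : Int) = v <;> simp [hv]

theorem B_eq (arr : List Int) (k : Int) :
    f_alt arr k = (LB arr).foldl (step arr k) (0, 0) := by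
  have hofc : PySem.Dict.ofList [((0 : Int), (1 : Int))] = PySem.Dict.empty.insert 0 1 := rfl
  have hoff : PySem.Dict.ofList [((0 : Int), (0 : Int))] = PySem.Dict.empty.insert 0 0 := rfl
  have h := B_inv arr k arr 0 (by simp) List.drop_zero
    (PySem.Dict.ofList [(0, 1)]) (PySem.Dict.ofList [(0, 0)]) 0 0
    (fun v => by
      simp only [Nat.cast_zero]
      rw [starts_zero, hofc, PySem.Dict.getD_insert]
      by_cases hv : (0 : Int) = v
      · simp [hv.symm]
      · simp [hv, Ne.symm hv, PySem.Dict.getD_empty])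
    (fun v => by
      simp only [Nat.cast_zero]
      rw [starts_zero, hofc, PySem.Dict.contains_insert]
      by_cases hv : (0 : Int) = v
      · simp [hv.symm]
      · simp [hv, Ne.symm hv, PySem.Dict.contains_empty])
    (fun v => by
      simp only [Nat.cast_zero]
      rw [starts_zero, hoff, PySem.Dict.contains_insert]
      by_cases hv : (0 : Int) = v
      · simp [hv.symm]
      · simp [hv, Ne.symm hv, PySem.Dict.contains_empty])
    (fun v i0 L0 hst => by
      simp only [Nat.cast_zero] at hst
      rw [starts_zero] at hst
      by_cases hv : (0 : Int) = v
      · rw [if_pos hv] at hst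
        injection hst with h1 _
        rw [hoff, ← hv, PySem.Dict.getD_insert_self, h1]
      · rw [if_neg hv] at hst
        exact absurd hst.symm (List.cons_ne_nil i0 L0))
  simp only at h
  exact h

-- ===== VERDICT (by name: the statement is the Claim_ definition above) =====
theorem f_spec : Claim_equal_f := by
  intro arr k _
  unfold Spec_f
  rw [A_eq, B_eq]
  exact (LA_perm_LB arr).foldl_eq' (fun x _ y _ z => step_rcomm arr k z x y) (0, 0)
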